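-- pv_equiv track=rewrite | github.com/aint-vscp/Radial.Calculation | radialCalc.py | radial_to_decimal
-- ===== SOURCE A (Python) =====
-- def radial_to_decimal(radial_num, base):
--     decimal_num = 0
--     power = len(radial_num) - 1
--     steps = []
--     steps.append("")
--     for digit in radial_num:
--         if digit.isdigit():
--             value = int(digit) * (base ** power)
--             steps.append(f"Step: Multiply {digit} by {base}^{power} = {value}")
--             decimal_num += value
--         else:
--             value = (ord(digit.upper()) - ord('A') + 10) * (base ** power)
--             steps.append(f"Step: Multiply {digit} by {base}^{power} = {value}")
--             decimal_num += value
--         power -= 1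
--     steps.append("")
--     steps.append(f"Step: Add all the values. {radial_num} = {decimal_num} in decimal.")
--     return steps, decimal_num
-- ===== SOURCE B (Python) =====
-- def _dv(d):
--     return int(d) if d.isdigit() else ord(d.upper()) - ord('A') + 10
--
--
-- def radial_to_decimal(radial_num, base):
--     n = len(radial_num)
--     # pass 1: (power, multiplier) table built incrementally, then reversed
--     pm = []
--     p, m = 0, 1
--     for _ in range(n):
--         pm.append((p, m))
--         p, m = p + 1, m * base
--     pm.reverse()
--     # pass 2: the decimal value by Horner's rule (no exponentiation at all)
--     total = 0
--     for d in radial_num: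
--         total = total * base + _dv(d)
--     # pass 3: the step log from the digit/table zip
--     steps = [""]
--     for d, (p, m) in zip(radial_num, pm):
--         steps.append(f"Step: Multiply {d} by {base}^{p} = {_dv(d) * m}")
--     steps.append("")
--     steps.append(f"Step: Add all the values. {radial_num} = {total} in decimal.")
--     return steps, total
-- ===== Notes on version B (the rewrite author's own statement) =====
-- stated objective: alternative
-- what changed: Replaces A's single loop with per-digit base**power exponentiation by three staged passes: an incrementally built (power, multiplier) table (one multiplication per digit), Horner's rule for the decimal value (no exponentiation at all), and a zip pass emitting the step log.
import Mathlib
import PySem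

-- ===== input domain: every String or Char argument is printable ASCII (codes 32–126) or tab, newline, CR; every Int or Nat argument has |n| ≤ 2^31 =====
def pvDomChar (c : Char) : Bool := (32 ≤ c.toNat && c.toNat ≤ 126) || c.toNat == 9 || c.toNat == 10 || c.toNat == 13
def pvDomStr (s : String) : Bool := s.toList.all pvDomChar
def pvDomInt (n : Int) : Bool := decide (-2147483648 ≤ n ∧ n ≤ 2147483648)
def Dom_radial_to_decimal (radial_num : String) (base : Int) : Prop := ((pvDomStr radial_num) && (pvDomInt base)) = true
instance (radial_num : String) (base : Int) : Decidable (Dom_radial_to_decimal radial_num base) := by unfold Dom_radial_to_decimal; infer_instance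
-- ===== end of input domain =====

-- B replaces A's single loop with per-digit exponentiation by three staged passes:
-- an incrementally built (power, multiplier) table, a Horner fold for the decimal
-- value (no exponentiation), and a zip pass for the step log; objective: alternative.

-- shared string formatting (the f-strings of both Pythons); exact on the ASCII domain
def pvStep (digit : Char) (base power value : Int) : String :=
  String.mk ("Step: Multiply ".toList ++ [digit] ++ " by ".toList ++ PySem.Int.toChars base
    ++ "^".toList ++ PySem.Int.toChars power ++ " = ".toList ++ PySem.Int.toChars value)

def pvFinal (radial_num : String) (dec : Int) : String :=
  String.mk ("Step: Add all the values. ".toList ++ radial_num.toList ++ " = ".toList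
    ++ PySem.Int.toChars dec ++ " in decimal.".toList)

-- ===== PORT A =====
-- the for-loop over the digits; state (decimal_num, power, steps); base ** power with power ≥ 0
-- throughout the loop, so base ^ power.toNat is exact
def loopA (base : Int) : List Char → Int × Int × List String → Int × Int × List String
  | [], st => st
  | digit :: rest, (decimal_num, power, steps) =>
      if PySem.Chars.isdigit digit then
        let value := ((digit.toNat : Int) - 48) * base ^ power.toNat   -- int(digit)
        loopA base rest (decimal_num + value, power - 1, steps ++ [pvStep digit base power value])
      else
        -- (ord(digit.upper()) - ord('A') + 10); upperChar = Python str.upper on one ASCII char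
        let value := (((PySem.Chars.upperChar digit).toNat : Int) - 65 + 10) * base ^ power.toNat
        loopA base rest (decimal_num + value, power - 1, steps ++ [pvStep digit base power value])

def radial_to_decimal (radial_num : String) (base : Int) : List String × Int :=
  let st := loopA base radial_num.toList (0, (radial_num.toList.length : Int) - 1, [""])
  (st.2.2 ++ ["", pvFinal radial_num st.1], st.1)

-- ===== PORT B =====
-- _dv: the digit's value (int(d) or ord-arithmetic, exactly B's helper)
def dvB (d : Char) : Int :=
  if PySem.Chars.isdigit d then (d.toNat : Int) - 48
  else ((PySem.Chars.upperChar d).toNat : Int) - 65 + 10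

-- pass 1: 'for _ in range(n): pm.append((p, m)); p, m = p+1, m*base', then pm.reverse()
def pmLoop (base : Int) : Nat → Int × Int → List (Int × Int) → List (Int × Int)
  | 0, _, pm => pm
  | k + 1, (p, m), pm => pmLoop base k (p + 1, m * base) (pm ++ [(p, m)])

-- pass 2: Horner's rule 'total = total * base + _dv(d)'
def hornerLoop (base : Int) : List Char → Int → Int
  | [], total => total
  | d :: rest, total => hornerLoop base rest (total * base + dvB d)

-- pass 3: 'for d, (p, m) in zip(radial_num, pm): steps.append(...)'
def stepsLoop (base : Int) : List (Char × Int × Int) → List String → List String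
  | [], steps => steps
  | (d, pm) :: rest, steps =>
      stepsLoop base rest (steps ++ [pvStep d base pm.1 (dvB d * pm.2)])

def radial_to_decimal_alt (radial_num : String) (base : Int) : List String × Int :=
  let pm := (pmLoop base radial_num.toList.length (0, 1) []).reverse
  let total := hornerLoop base radial_num.toList 0
  let steps := stepsLoop base (radial_num.toList.zip pm) [""]
  (steps ++ ["", pvFinal radial_num total], total)

-- ===== PRECONDITION & SPEC =====
def Spec_radial_to_decimal (radial_num : String) (base : Int) (out : List String × Int) : Prop := out = radial_to_decimal_alt radial_num base
instance (radial_num : String) (base : Int) (out : List String × Int) : Decidable (Spec_radial_to_decimal radial_num base out) := by unfold Spec_radial_to_decimal; infer_instance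

-- ===== CLAIM (what is proved, stated in full; the proofs are below) =====
def Claim_equal_radial_to_decimal : Prop := ∀ (radial_num : String) (base : Int), Dom_radial_to_decimal radial_num base → Spec_radial_to_decimal radial_num base (radial_to_decimal radial_num base)


-- ===== LEMMAS AND PROOFS =====

-- the (step string, value) pairs A produces, left to right, power descending from p
def pairsA (base : Int) : List Char → Int → List (String × Int)
  | [], _ => []
  | d :: t, p =>
      (pvStep d base p (dvB d * base ^ p.toNat), dvB d * base ^ p.toNat) :: pairsA base t (p - 1)

theorem loopA_eq (base : Int) : ∀ (cs : List Char) (dec0 p : Int) (steps0 : List String),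
    loopA base cs (dec0, p, steps0)
      = (dec0 + ((pairsA base cs p).map Prod.snd).sum, p - cs.length,
         steps0 ++ (pairsA base cs p).map Prod.fst) := by
  intro cs
  induction cs with
  | nil => intro dec0 p steps0; simp [loopA, pairsA]
  | cons d t ih =>
      intro dec0 p steps0
      by_cases h : PySem.Chars.isdigit d
      · simp only [loopA, h, if_pos, ih, pairsA, dvB, List.map_cons, List.sum_cons,
          List.length_cons, List.append_assoc, List.singleton_append, Prod.mk.injEq]
        exact ⟨by ring, by push_cast; ring, trivial⟩
      · simp only [loopA, h, ih, pairsA, dvB, List.map_cons, List.sum_cons,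
          Bool.false_eq_true, if_false, List.length_cons, List.append_assoc,
          List.singleton_append, Prod.mk.injEq]
        exact ⟨by ring, by push_cast; ring, trivial⟩

theorem pmLoop_eq (base : Int) : ∀ (k : Nat) (p m : Int) (pm : List (Int × Int)),
    pmLoop base k (p, m) pm
      = pm ++ (List.range k).map (fun (i : Nat) => (p + (i : Int), m * base ^ i)) := by
  intro k
  induction k with
  | zero => intro p m pm; simp [pmLoop]
  | succ k ih =>
      intro p m pm
      rw [pmLoop, ih, List.range_succ_eq_map]
      simp only [List.map_cons, List.map_map, List.append_assoc, List.singleton_append]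
      congr 2
      · push_cast; ring_nf
      · refine List.map_congr_left fun i _ => ?_
        simp only [Function.comp_apply, Nat.succ_eq_add_one, pow_succ, Prod.mk.injEq]
        constructor <;> push_cast <;> ring

theorem hornerLoop_eq (base : Int) : ∀ (cs : List Char) (t : Int),
    hornerLoop base cs t
      = t * base ^ cs.length + ((pairsA base cs ((cs.length : Int) - 1)).map Prod.snd).sum := by
  intro cs
  induction cs with
  | nil => intro t; simp [hornerLoop, pairsA]
  | cons d rest ih =>
      intro t
      rw [hornerLoop, ih]
      simp only [pairsA, List.length_cons, List.map_cons, List.sum_cons]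
      have h1 : ((rest.length : Int) + 1 - 1) = (rest.length : Int) := by ring
      have h2 : ((rest.length : Int)).toNat = rest.length := by simp
      push_cast
      rw [h1, h2]
      ring

theorem stepsLoop_eq (base : Int) : ∀ (l : List (Char × Int × Int)) (acc : List String),
    stepsLoop base l acc
      = acc ++ l.map (fun x => pvStep x.1 base x.2.1 (dvB x.1 * x.2.2)) := by
  intro l
  induction l with
  | nil => intro acc; simp [stepsLoop]
  | cons x rest ih => intro acc; cases x with
      | mk d pm => rw [stepsLoop, ih]; simp

theorem zip_pairs (base : Int) : ∀ (cs : List Char),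
    (cs.zip (((List.range cs.length).map (fun (i : Nat) => (((i : Int), base ^ i) : Int × Int))).reverse)).map
        (fun x => pvStep x.1 base x.2.1 (dvB x.1 * x.2.2))
      = (pairsA base cs ((cs.length : Int) - 1)).map Prod.fst := by
  intro cs
  induction cs with
  | nil => simp [pairsA]
  | cons d t ih =>
      simp only [List.length_cons, List.range_succ, List.map_append, List.map_cons,
        List.map_nil, List.reverse_append, List.reverse_cons, List.reverse_nil,
        List.nil_append, List.cons_append, List.zip_cons_cons, pairsA]
      rw [ih]
      have e1 : ((t.length + 1 : Nat) : Int) - 1 = (t.length : Int) := by push_cast; ring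
      rw [e1, Int.toNat_natCast]

theorem radial_to_decimal_eq_alt (radial_num : String) (base : Int) :
    radial_to_decimal radial_num base = radial_to_decimal_alt radial_num base := by
  unfold radial_to_decimal radial_to_decimal_alt
  simp only [loopA_eq, pmLoop_eq, hornerLoop_eq, stepsLoop_eq, List.nil_append, zero_add,
    one_mul, zero_mul, zip_pairs]

-- ===== VERDICT (by name: the statement is the Claim_ definition above) =====
theorem radial_to_decimal_spec : Claim_equal_radial_to_decimal := by
  intro radial_num base _
  unfold Spec_radial_to_decimal
  exact radial_to_decimal_eq_alt radial_num base
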